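-- pv_equiv track=rewrite | github.com/rusty-code/repouniver | lab7/Spis19.py | func
-- ===== SOURCE A (Python) =====
-- def func(arr, var):
--     for go in range(0, var):
--         for it in range(0, len(arr)):
--             if arr[it] == 0:
--                 for it1 in range(it+1, len(arr)):
--                     arr[it1-1] = arr[it1]
--                     arr[it1] = 0
--     return arr
-- ===== SOURCE B (Python) =====
-- def func(arr, var):
--     n = len(arr)
--     for _ in range(var):
--         res = []
--         zeros = 0
--         i = 0
--         while i < n:
--             if arr[i] == 0:
--                 zeros += 1
--                 if i + 1 < n:
--                     res.append(arr[i + 1])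
--                 i += 2
--             else:
--                 res.append(arr[i])
--                 i += 1
--         new = res + [0] * zeros
--         if new == arr:
--             break
--         arr[:] = new
--     return arr
-- ===== Notes on version B (the rewrite author's own statement) =====
-- stated objective: faster
-- what changed: Each pass becomes a single left-to-right scan that drops a zero, keeps the following element unexamined and pads the counted zeros at the end, and the pass loop stops early at a fixed point (a pass that changes nothing makes all remaining passes no-ops), instead of A's per-zero O(n) in-place shifting repeated var times.
import Mathlib
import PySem

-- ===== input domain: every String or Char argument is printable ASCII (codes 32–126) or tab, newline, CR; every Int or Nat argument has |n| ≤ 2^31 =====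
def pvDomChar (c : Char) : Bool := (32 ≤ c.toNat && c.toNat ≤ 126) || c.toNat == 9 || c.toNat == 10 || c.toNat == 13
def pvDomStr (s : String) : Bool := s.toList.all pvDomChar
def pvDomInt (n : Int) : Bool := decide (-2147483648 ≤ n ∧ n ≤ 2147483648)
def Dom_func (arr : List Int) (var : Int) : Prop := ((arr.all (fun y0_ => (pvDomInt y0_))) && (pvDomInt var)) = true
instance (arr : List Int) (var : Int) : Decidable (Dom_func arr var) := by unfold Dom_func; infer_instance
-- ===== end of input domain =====

-- B replaces A's per-zero O(n) in-place shifting by one flat scan per pass (drop a zero, keep the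
-- next element unexamined, count dropped zeros and pad them at the end): measured faster.
-- Both Pythons mutate `arr` in place and end with arr equal to the returned list;
-- the theorems below are about the returned value.

-- ===== PORT A =====
-- inner body: arr[it1-1] = arr[it1]; arr[it1] = 0   (indices are nonnegative and in range, so pyGetD/pySetD are exact)
def innerStep (a : List Int) (it1 : Int) : List Int :=
  PySem.List.pySetD (PySem.List.pySetD a (it1 - 1) (PySem.List.pyGetD a it1 0)) it1 0

-- for it1 in range(it+1, len(arr)): ...
def funcInner (a : List Int) (it : Int) : List Int :=
  (PySem.List.pyRange (it + 1) (a.length : Int) 1).foldl innerStep a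

-- one iteration of the middle loop body: if arr[it] == 0: <inner loop>
def passStep (a : List Int) (it : Int) : List Int :=
  if PySem.List.pyGetD a it 0 = 0 then funcInner a it else a

-- for it in range(0, len(arr)): ...
def funcPass (a : List Int) : List Int :=
  (PySem.List.pyRange 0 (a.length : Int) 1).foldl passStep a

def func (arr : List Int) (var : Int) : List Int :=
  (PySem.List.pyRange 0 var 1).foldl (fun a _go => funcPass a) arr

-- ===== PORT B =====
-- the while-loop scan of Source B as the obvious structural recursion:
-- returns (res, zeros): the kept elements and the number of dropped zeros
def scanZeros : List Int → List Int × Nat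
  | [] => ([], 0)
  | x :: rest =>
    if x = 0 then
      match rest with
      | [] => ([], 1)
      | y :: rest2 => let p := scanZeros rest2; (y :: p.1, p.2 + 1)
    else
      let p := scanZeros rest; (x :: p.1, p.2)

-- new = res + [0] * zeros
def passAlt (a : List Int) : List Int :=
  (scanZeros a).1 ++ List.replicate (scanZeros a).2 0

-- for _ in range(var): new = <one scan>; if new == arr: break; arr[:] = new
def altLoop : Nat → List Int → List Int
  | 0, a => a
  | k+1, a => let b := passAlt a; if b = a then a else altLoop k b

def func_alt (arr : List Int) (var : Int) : List Int :=
  altLoop var.toNat arr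

-- ===== PRECONDITION & SPEC =====
def Spec_func (arr : List Int) (var : Int) (out : List Int) : Prop := out = func_alt arr var
instance (arr : List Int) (var : Int) (out : List Int) : Decidable (Spec_func arr var out) := by unfold Spec_func; infer_instance

-- ===== CLAIM (what is proved, stated in full; the proofs are below) =====
def Claim_equal_func : Prop := ∀ (arr : List Int) (var : Int), Dom_func arr var → Spec_func arr var (func arr var)

-- ===== LEMMAS AND PROOFS =====

lemma scanZeros_cons_ne (x : Int) (rest : List Int) (hx : x ≠ 0) :
    scanZeros (x :: rest) = (x :: (scanZeros rest).1, (scanZeros rest).2) := by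
  rw [scanZeros.eq_def]; simp [hx]

-- A's inner shifting loop, run from index pre.length+1 on pre ++ 0 :: suf, deletes the zero and appends a 0
lemma inner_aux (suf : List Int) : ∀ (pre : List Int),
    (PySem.List.pyRange ((pre.length : Int) + 1) (((pre ++ 0 :: suf).length : Int)) 1).foldl
      innerStep (pre ++ 0 :: suf) = pre ++ suf ++ [0] := by
  induction suf with
  | nil =>
    intro pre
    rw [PySem.List.pyRange_one_eq_nil (by simp)]
    simp
  | cons y suf' ih =>
    intro pre
    rw [PySem.List.pyRange_one_cons (by simp)]
    have hstep : innerStep (pre ++ 0 :: y :: suf') ((pre.length : Int) + 1)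
        = (pre ++ [y]) ++ 0 :: suf' := by
      unfold innerStep
      rw [show ((pre.length:Int)+1) - 1 = ((pre.length:Nat):Int) by ring]
      rw [PySem.List.pySetD_natCast]
      rw [show ((pre.length:Int)+1) = (((pre.length+1:Nat)):Int) by push_cast; ring]
      rw [PySem.List.pySetD_natCast, PySem.List.pyGetD_natCast]
      simp
    rw [List.foldl_cons, hstep]
    have h := ih (pre ++ [y])
    simp only [List.length_append, List.length_cons, List.length_nil] at h ⊢
    rw [show ((pre.length:Int) + 1 + 1) = ((pre.length + 1 : Nat) : Int) + 1 by push_cast; ring,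
        show (pre.length + (suf'.length + 1 + 1)) = pre.length + (0+1) + (suf'.length + 1) by omega,
        show (pre.length + 1) = pre.length + (0+1) by omega]
    rw [h]
    simp

lemma funcInner_eq (pre suf : List Int) :
    funcInner (pre ++ 0 :: suf) (pre.length : Int) = pre ++ suf ++ [0] := by
  unfold funcInner
  exact inner_aux suf pre

-- loop invariant for one pass of A: `out` is already produced, `rem` is still to be scanned,
-- z zeros have been shifted to the end so far
lemma pass_aux (t : Nat) : ∀ (out rem : List Int) (z : Nat), rem.length + z = t →
    (PySem.List.pyRange (out.length : Int) (((out ++ rem ++ List.replicate z 0).length : Int)) 1).foldl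
      passStep (out ++ rem ++ List.replicate z 0)
      = out ++ (scanZeros rem).1 ++ List.replicate (z + (scanZeros rem).2) 0 := by
  induction t with
  | zero =>
    intro out rem z h
    have hrem : rem = [] := by cases rem with | nil => rfl | cons a l => simp at h
    have hz : z = 0 := by omega
    subst hrem hz
    rw [PySem.List.pyRange_one_eq_nil (by simp)]
    simp [scanZeros]
  | succ t ih =>
    intro out rem z h
    rw [PySem.List.pyRange_one_cons (by simp; omega), List.foldl_cons]
    cases rem with
    | nil =>
      -- the scanned cell is a padded zero: the shift is a no-op modulo moving one pad zero
      have hz : z = t + 1 := by simpa using h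
      subst hz
      have hget : PySem.List.pyGetD (out ++ [] ++ List.replicate (t+1) 0) ((out.length : Int)) 0 = 0 := by
        rw [PySem.List.pyGetD_natCast]
        simp [List.replicate_succ]
      have hstep : passStep (out ++ [] ++ List.replicate (t+1) 0) ((out.length : Int))
          = (out ++ [0]) ++ [] ++ List.replicate t 0 := by
        rw [passStep, if_pos hget,
            show out ++ [] ++ List.replicate (t+1) 0 = out ++ 0 :: List.replicate t 0 by simp [List.replicate_succ],
            funcInner_eq]
        simp [← List.replicate_succ', List.replicate_succ]
      rw [hstep]
      have h2 := ih (out ++ [0]) [] t (by simp)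
      simp only [List.length_append, List.length_cons, List.length_nil, List.length_replicate,
        List.append_nil, List.nil_append] at h2 ⊢
      push_cast at h2 ⊢
      rw [show ((out.length : Int) + ((t:Int) + 1)) = ↑out.length + 1 + (t:Int) by ring]
      rw [h2]
      simp [scanZeros, List.replicate_succ]
    | cons x rest =>
      by_cases hx : x = 0
      · subst hx
        have hget : PySem.List.pyGetD (out ++ 0 :: rest ++ List.replicate z 0) ((out.length : Int)) 0 = 0 := by
          rw [PySem.List.pyGetD_natCast]; simp
        have hstep : passStep (out ++ 0 :: rest ++ List.replicate z 0) ((out.length : Int))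
            = out ++ rest ++ List.replicate (z+1) 0 := by
          rw [passStep, if_pos hget,
              show out ++ 0 :: rest ++ List.replicate z 0 = out ++ 0 :: (rest ++ List.replicate z 0) by simp,
              funcInner_eq]
          simp [← List.replicate_succ']
        rw [hstep]
        cases rest with
        | nil =>
          have h2 := ih (out ++ [0]) [] z (by simp at h ⊢; omega)
          simp only [List.length_append, List.length_cons, List.length_nil, List.length_replicate,
            List.append_nil, List.nil_append] at h2 ⊢
          push_cast at h2 ⊢
          rw [show out ++ List.replicate (z+1) 0 = out ++ [0] ++ List.replicate z 0 by simp [List.replicate_succ]]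
          rw [h2]
          simp [scanZeros, List.replicate_succ]
        | cons y rest2 =>
          have h2 := ih (out ++ [y]) rest2 (z+1) (by simp at h; omega)
          simp only [List.length_append, List.length_cons, List.length_nil, List.length_replicate,
            List.append_nil, List.nil_append] at h2 ⊢
          push_cast at h2 ⊢
          rw [show (z + 1 + (scanZeros rest2).2) = z + ((scanZeros rest2).2 + 1) by omega] at h2
          rw [show out ++ y :: rest2 ++ List.replicate (z+1) 0 = out ++ [y] ++ rest2 ++ List.replicate (z+1) 0 by simp,
              show ((out.length:Int) + ((rest2.length:Int) + 1 + 1) + (z:Int)) = ↑out.length + 1 + (rest2.length:Int) + ((z:Int) + 1) by ring]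
          rw [h2]
          simp [scanZeros]
      · have hget : PySem.List.pyGetD (out ++ x :: rest ++ List.replicate z 0) ((out.length : Int)) 0 = x := by
          rw [PySem.List.pyGetD_natCast]; simp
        have hstep : passStep (out ++ x :: rest ++ List.replicate z 0) ((out.length : Int))
            = (out ++ [x]) ++ rest ++ List.replicate z 0 := by
          rw [passStep, if_neg (by rw [hget]; exact hx)]
          simp
        rw [hstep]
        have h2 := ih (out ++ [x]) rest z (by simp at h ⊢; omega)
        simp only [List.length_append, List.length_cons, List.length_nil, List.length_replicate,
          List.append_nil, List.nil_append] at h2 ⊢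
        push_cast at h2 ⊢
        rw [show ((out.length:Int) + ((rest.length:Int) + 1) + (z:Int)) = ↑out.length + 1 + ↑rest.length + ↑z by ring]
        rw [h2]
        simp [scanZeros_cons_ne x rest hx]

lemma funcPass_eq (a : List Int) : funcPass a = passAlt a := by
  unfold funcPass passAlt
  have h := pass_aux (a.length + 0) [] a 0 (by simp)
  simpa using h

-- a constant-body foldl is function iteration
lemma foldl_const_apply (f : List Int → List Int) (l : List Int) :
    ∀ x : List Int, l.foldl (fun a _ => f a) x = f^[l.length] x := by
  induction l with
  | nil => intro x; simp
  | cons y l ih => intro x; simp [ih, Function.iterate_succ_apply]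

-- B's early-exit loop computes the same iterate: once a pass is the identity, so are all later ones
lemma altLoop_eq_iterate : ∀ (k : Nat) (a : List Int), altLoop k a = passAlt^[k] a := by
  intro k
  induction k with
  | zero => intro a; simp [altLoop]
  | succ k ih =>
    intro a
    rw [altLoop]
    by_cases hfix : passAlt a = a
    · simp [hfix, Function.iterate_fixed hfix]
    · simp [hfix, ih, Function.iterate_succ_apply]

-- ===== VERDICT (by name: the statement is the Claim_ definition above) =====
theorem func_spec : Claim_equal_func := by
  intro arr var _
  unfold Spec_func func func_alt
  have h : (fun (a : List Int) (_go : Int) => funcPass a) = (fun (a : List Int) (_ : Int) => passAlt a) := by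
    funext a _; exact funcPass_eq a
  rw [h, foldl_const_apply passAlt, altLoop_eq_iterate, PySem.List.length_pyRange_one]
  norm_num
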